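-- pv_equiv track=rewrite | github.com/romamartyanov/BSUIR-IITP-2016-2020 | SAiIO/src_a/lab10_assignments/assignments.py | prepare_answer
-- ===== SOURCE A (Python) =====
-- def prepare_answer(flow, costs, n):
--     ans = []
--     total_cost = 0
--
--     for i in range(1, n + 1):
--         for j in range(1, n + 1):
--             if flow.get(i, {}).get(j + n, 0) != 1: continue
--
--             ans.append(j - 1)
--             total_cost += costs[i - 1, j - 1]
--
--     return ans, total_cost
-- ===== SOURCE B (Python) =====
-- def prepare_answer(flow, costs, n):
--     ans = []
--     total_cost = 0
--     for i in range(1, n + 1):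
--         row = flow.get(i, {})
--         for j in sorted(k - n for k, v in row.items() if n + 1 <= k <= 2 * n and v == 1):
--             ans.append(j - 1)
--             total_cost += costs[i - 1, j - 1]
--     return ans, total_cost
-- ===== Notes on version B (the rewrite author's own statement) =====
-- stated objective: faster
-- what changed: Instead of probing all n possible targets j for each i with dict lookups, B walks the actual entries of flow[i], keeps keys in (n..2n] with value 1, and sorts the derived targets j=k-n, so work is proportional to the edges present in the sparse flow dict rather than n^2 probes.
import Mathlib
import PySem

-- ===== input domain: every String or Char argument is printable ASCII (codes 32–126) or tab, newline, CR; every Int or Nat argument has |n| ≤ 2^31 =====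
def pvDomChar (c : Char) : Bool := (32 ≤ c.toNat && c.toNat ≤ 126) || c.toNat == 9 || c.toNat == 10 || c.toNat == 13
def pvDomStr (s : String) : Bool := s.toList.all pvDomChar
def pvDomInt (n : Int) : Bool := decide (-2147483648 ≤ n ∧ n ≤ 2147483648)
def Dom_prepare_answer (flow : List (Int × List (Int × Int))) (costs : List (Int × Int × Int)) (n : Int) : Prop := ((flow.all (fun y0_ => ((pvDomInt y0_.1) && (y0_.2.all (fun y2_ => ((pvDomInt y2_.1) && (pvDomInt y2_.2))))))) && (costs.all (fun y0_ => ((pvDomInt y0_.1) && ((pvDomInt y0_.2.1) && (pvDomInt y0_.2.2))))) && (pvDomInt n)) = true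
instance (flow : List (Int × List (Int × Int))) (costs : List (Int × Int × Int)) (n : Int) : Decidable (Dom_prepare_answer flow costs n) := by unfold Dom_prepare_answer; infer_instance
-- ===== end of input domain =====

-- B replaces A's dense inner scan over all j in 1..n by a pass over the entries actually
-- present in flow[i] (filtered to keys in (n..2n] with value 1, then sorted); same result.

-- ===== PORT A =====
-- flow.get(i, {})  (association-list first match; Pre_ requires unique keys, as in a Python dict)
def pvGetRow (flow : List (Int × List (Int × Int))) (i : Int) : List (Int × Int) :=
  match flow.find? (fun p => p.1 == i) with
  | some p => p.2
  | none => []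

-- row.get(k, 0)
def pvGetV (d : List (Int × Int)) (k : Int) : Int :=
  match d.find? (fun p => p.1 == k) with
  | some p => p.2
  | none => 0

-- costs[a, b]: Python raises KeyError when the key is absent; Pre_ excludes exactly that,
-- so the 'none' default is never reached on admitted inputs.
def pvCost (costs : List (Int × Int × Int)) (a b : Int) : Int :=
  match costs.find? (fun t => t.1 == a && t.2.1 == b) with
  | some t => t.2.2
  | none => 0

def prepare_answer (flow : List (Int × List (Int × Int))) (costs : List (Int × Int × Int)) (n : Int) : List Int × Int :=
  (PySem.List.pyRange 1 (n + 1) 1).foldl (fun st i =>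
    (PySem.List.pyRange 1 (n + 1) 1).foldl (fun st j =>
      if pvGetV (pvGetRow flow i) (j + n) != 1 then st
      else (st.1 ++ [j - 1], st.2 + pvCost costs (i - 1) (j - 1))) st) ([], 0)

-- ===== PORT B =====
def prepare_answer_alt (flow : List (Int × List (Int × Int))) (costs : List (Int × Int × Int)) (n : Int) : List Int × Int :=
  (PySem.List.pyRange 1 (n + 1) 1).foldl (fun st i =>
    (PySem.List.sorted (((pvGetRow flow i).filter
        (fun kv => decide (n + 1 ≤ kv.1) && decide (kv.1 ≤ 2 * n) && (kv.2 == 1))).map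
        (fun kv => kv.1 - n)) (fun x => x) false).foldl
      (fun st j => (st.1 ++ [j - 1], st.2 + pvCost costs (i - 1) (j - 1))) st) ([], 0)

-- ===== PRECONDITION & SPEC =====
-- Pre_ excludes (a) association lists with duplicate keys, which do not represent a Python
-- dict (first-vs-last-match is then accidental), and (b) inputs where a selected pair's
-- cost key (i-1, j-1) is missing from costs, on which Python A raises KeyError.
def Pre_prepare_answer (flow : List (Int × List (Int × Int))) (costs : List (Int × Int × Int)) (n : Int) : Prop :=
  (flow.map Prod.fst).Nodup ∧
  (∀ p ∈ flow, (p.2.map Prod.fst).Nodup) ∧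
  (costs.map (fun t => (t.1, t.2.1))).Nodup ∧
  (∀ kv ∈ flow, ∀ e ∈ kv.2,
     1 ≤ kv.1 → kv.1 ≤ n → n + 1 ≤ e.1 → e.1 ≤ 2 * n → e.2 = 1 →
     ∃ t ∈ costs, t.1 = kv.1 - 1 ∧ t.2.1 = e.1 - n - 1)
instance (flow : List (Int × List (Int × Int))) (costs : List (Int × Int × Int)) (n : Int) : Decidable (Pre_prepare_answer flow costs n) := by unfold Pre_prepare_answer; infer_instance

def pvWitness_prepare_answer : (List (Int × List (Int × Int))) × (List (Int × Int × Int)) × Int :=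
  ([(1, [(3, 1)])], [(0, 0, 5)], 2)

def Spec_prepare_answer (flow : List (Int × List (Int × Int))) (costs : List (Int × Int × Int)) (n : Int) (out : List Int × Int) : Prop := out = prepare_answer_alt flow costs n
instance (flow : List (Int × List (Int × Int))) (costs : List (Int × Int × Int)) (n : Int) (out : List Int × Int) : Decidable (Spec_prepare_answer flow costs n out) := by unfold Spec_prepare_answer; infer_instance

-- ===== CLAIM (what is proved, stated in full; the proofs are below) =====
def Claim_equal_prepare_answer : Prop := ∀ (flow : List (Int × List (Int × Int))) (costs : List (Int × Int × Int)) (n : Int), Dom_prepare_answer flow costs n → Pre_prepare_answer flow costs n → Spec_prepare_answer flow costs n (prepare_answer flow costs n)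

-- ===== LEMMAS AND PROOFS =====

-- a 'continue' guard: skipping on p is folding over the elements with ¬p
lemma pv_foldl_skip {α β : Type} (p : α → Bool) (f : β → α → β) (l : List α) (b : β) :
    l.foldl (fun st x => if p x then st else f st x) b = (l.filter (fun x => !p x)).foldl f b := by
  have h : (fun (st : β) (x : α) => if p x then st else f st x)
      = (fun st x => if !p x then f st x else st) := by
    funext st x; cases p x <;> simp
  rw [h, PySem.List.foldl_if_eq_foldl_filter]

-- first-match lookup on a unique-key association list
lemma pv_getV_eq_one_iff (d : List (Int × Int)) (hd : (d.map Prod.fst).Nodup) (k : Int) :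
    pvGetV d k = 1 ↔ (k, 1) ∈ d := by
  induction d with
  | nil => simp [pvGetV]
  | cons a t ih =>
    simp only [List.map_cons, List.nodup_cons] at hd
    by_cases hak : a.1 = k
    · have : pvGetV (a :: t) k = a.2 := by
        simp [pvGetV, List.find?_cons_of_pos, hak]
      rw [this]
      simp only [List.mem_cons]
      constructor
      · intro h2
        exact Or.inl (Prod.ext_iff.mpr ⟨hak.symm, h2.symm⟩)
      · rintro (h | h)
        · exact ((Prod.ext_iff.mp h).2).symm
        · exfalso; exact hd.1 (by simpa [hak] using List.mem_map_of_mem (f := Prod.fst) h)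
    · have : pvGetV (a :: t) k = pvGetV t k := by
        simp [pvGetV, List.find?_cons_of_neg, hak]
      rw [this, ih hd.2]
      simp only [List.mem_cons]
      constructor
      · intro h; exact Or.inr h
      · rintro (h | h)
        · exact absurd (Prod.ext_iff.mp h).1.symm hak
        · exact h

-- the heart: per row, B's sorted sparse pass equals A's filtered dense scan
lemma pv_inner_eq (d : List (Int × Int)) (hd : (d.map Prod.fst).Nodup) (n : Int) :
    PySem.List.sorted ((d.filter
        (fun kv => decide (n + 1 ≤ kv.1) && decide (kv.1 ≤ 2 * n) && (kv.2 == 1))).map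
        (fun kv => kv.1 - n)) (fun x => x) false
      = (PySem.List.pyRange 1 (n + 1) 1).filter (fun j => !(pvGetV d (j + n) != 1)) := by
  set p : Int × Int → Bool := fun kv => decide (n + 1 ≤ kv.1) && decide (kv.1 ≤ 2 * n) && (kv.2 == 1) with hp
  set q : Int → Bool := fun j => !(pvGetV d (j + n) != 1) with hq
  apply PySem.List.sorted_eq_of_perm_of_pairwise_lt
  · -- permutation: both sides are nodup with the same membership
    have hys : ((PySem.List.pyRange 1 (n + 1) 1).filter q).Nodup :=
      (PySem.List.nodup_pyRange_one 1 (n + 1)).filter q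
    have hxs : ((d.filter p).map (fun kv => kv.1 - n)).Nodup := by
      have h1 : ((d.filter p).map Prod.fst).Nodup :=
        hd.sublist ((List.filter_sublist (l := d)).map Prod.fst)
      have h2 : (d.filter p).map (fun kv => kv.1 - n)
          = ((d.filter p).map Prod.fst).map (fun x => x - n) := by
        simp [List.map_map, Function.comp]
      rw [h2]
      exact h1.map (fun x y hxy => by omega)
    rw [List.perm_ext_iff_of_nodup hys hxs]
    intro j
    simp only [List.mem_filter, List.mem_map, PySem.List.mem_pyRange_one]
    constructor
    · rintro ⟨⟨h1, h2⟩, h3⟩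
      have hv : pvGetV d (j + n) = 1 := by
        simp only [hq, bne, Bool.not_not, beq_iff_eq] at h3; exact h3
      refine ⟨(j + n, 1), ?_, by omega⟩
      refine ⟨(pv_getV_eq_one_iff d hd (j + n)).1 hv, ?_⟩
      simp only [hp, Bool.and_eq_true, decide_eq_true_eq, beq_iff_eq]
      refine ⟨⟨by omega, by omega⟩, trivial⟩
    · rintro ⟨kv, ⟨hmem, hcond⟩, hj⟩
      simp only [hp, Bool.and_eq_true, decide_eq_true_eq, beq_iff_eq] at hcond
      obtain ⟨⟨hb1, hb2⟩, hv1⟩ := hcond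
      have hkv : kv = (j + n, 1) := by
        obtain ⟨k, v⟩ := kv
        simp only at hj hv1 hb1 hb2
        exact Prod.ext_iff.mpr ⟨by omega, hv1⟩
      refine ⟨⟨by omega, by omega⟩, ?_⟩
      simp only [hq, bne, Bool.not_not, beq_iff_eq]
      exact (pv_getV_eq_one_iff d hd (j + n)).2 (hkv ▸ hmem)
  · -- the dense scan is strictly increasing
    exact (PySem.List.pairwise_lt_pyRange_one 1 (n + 1)).filter q

lemma pv_row_nodup (flow : List (Int × List (Int × Int)))
    (hp : ∀ p ∈ flow, (p.2.map Prod.fst).Nodup) (i : Int) :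
    ((pvGetRow flow i).map Prod.fst).Nodup := by
  unfold pvGetRow
  cases h : flow.find? (fun p => p.1 == i) with
  | none => simp
  | some p => exact hp p (List.mem_of_find?_eq_some h)

-- ===== VERDICT (by name: the statement is the Claim_ definition above) =====
theorem prepare_answer_spec : Claim_equal_prepare_answer := by
  intro flow costs n _ hpre
  obtain ⟨_, hrows, _, _⟩ := hpre
  unfold Spec_prepare_answer prepare_answer prepare_answer_alt
  congr 1
  funext st i
  rw [pv_foldl_skip, pv_inner_eq (pvGetRow flow i) (pv_row_nodup flow hrows i) n]
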